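-- pv_equiv track=rewrite | github.com/RoboCoder715/Assignments-PYTHON- | Assignment3.py.py | is_goal_reached
-- ===== SOURCE A (Python) =====
-- def is_goal_reached(path):
--     x=y=0
--     for p in path:
--         if p=="up": y+=1
--         elif p=="down": y-=1
--         elif p=="left": x-=1
--         elif p=="right": x+=1
--     return (x,y)==(2,0)
-- ===== SOURCE B (Python) =====
-- def is_goal_reached(path):
--     # Reduce the move word with two cancellation stacks (one per axis):
--     # an opposite move cancels the stack top, so each stack ends up a
--     # homogeneous run whose content is the net displacement on that axis.
--     h = []
--     v = []
--     for p in path: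
--         if p == "right" or p == "left":
--             if h and h[-1] != p:
--                 h.pop()
--             else:
--                 h.append(p)
--         elif p == "up" or p == "down":
--             if v and v[-1] != p:
--                 v.pop()
--             else:
--                 v.append(p)
--     return h == ["right", "right"] and v == []
-- ===== Notes on version B (the rewrite author's own statement) =====
-- stated objective: alternative
-- what changed: Replaces A's coordinate accumulation by a word-reduction algorithm: two per-axis cancellation stacks where an opposite move pops the stack top, and the final homogeneous stacks are compared against the goal's canonical reduced word.
import Mathlib
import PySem

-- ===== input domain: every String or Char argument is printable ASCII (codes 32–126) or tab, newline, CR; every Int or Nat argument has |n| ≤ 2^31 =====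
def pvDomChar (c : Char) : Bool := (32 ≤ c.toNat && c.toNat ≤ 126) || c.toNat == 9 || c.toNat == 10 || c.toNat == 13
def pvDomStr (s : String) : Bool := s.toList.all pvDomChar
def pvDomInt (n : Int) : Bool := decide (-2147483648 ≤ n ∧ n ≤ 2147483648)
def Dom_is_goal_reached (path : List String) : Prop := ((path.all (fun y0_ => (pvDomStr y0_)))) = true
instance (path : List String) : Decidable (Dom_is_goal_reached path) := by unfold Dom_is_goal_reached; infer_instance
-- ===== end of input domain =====

-- B replaces A's coordinate accumulation by per-axis cancellation stacks (word reduction); objective: alternative.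

-- ===== PORT A =====
-- literal port: one pass updating (x, y) with the same branch order
def is_goal_reached (path : List String) : Bool :=
  let st := path.foldl (fun (xy : Int × Int) p =>
    if p == "up" then (xy.1, xy.2 + 1)
    else if p == "down" then (xy.1, xy.2 - 1)
    else if p == "left" then (xy.1 - 1, xy.2)
    else if p == "right" then (xy.1 + 1, xy.2)
    else xy) (0, 0)
  st == ((2 : Int), (0 : Int))

-- ===== PORT B =====
-- literal port of Source B: per-axis cancellation stacks (append = push at end, pop = dropLast)
def pvStep (s : List String) (p : String) : List String :=
  if s ≠ [] ∧ s.getLast? ≠ some p then s.dropLast else s ++ [p]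

def is_goal_reached_alt (path : List String) : Bool :=
  let st := path.foldl (fun (hv : List String × List String) p =>
    if p == "right" || p == "left" then (pvStep hv.1 p, hv.2)
    else if p == "up" || p == "down" then (hv.1, pvStep hv.2 p)
    else hv) ([], [])
  st.1 == ["right", "right"] && st.2 == ([] : List String)

-- ===== PRECONDITION & SPEC =====
def Spec_is_goal_reached (path : List String) (out : Bool) : Prop := out = is_goal_reached_alt path
instance (path : List String) (out : Bool) : Decidable (Spec_is_goal_reached path out) := by unfold Spec_is_goal_reached; infer_instance

-- ===== CLAIM (what is proved, stated in full; the proofs are below) =====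
def Claim_equal_is_goal_reached : Prop := ∀ (path : List String), Dom_is_goal_reached path → Spec_is_goal_reached path (is_goal_reached path)

-- ===== LEMMAS AND PROOFS =====

-- canonical form of a cancellation stack with net displacement d (pos = positive token, neg = negative one)
def pvRep (pos neg : String) (d : Int) : List String :=
  if 0 ≤ d then List.replicate d.toNat pos else List.replicate (-d).toNat neg

theorem pvStep_pos (pos neg : String) (hne : pos ≠ neg) (d : Int) :
    pvStep (pvRep pos neg d) pos = pvRep pos neg (d + 1) := by
  unfold pvStep pvRep
  rcases lt_trichotomy d 0 with h | h | h
  · have h1 : ¬ 0 ≤ d := by omega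
    have h2 : (-d).toNat = ((-d).toNat - 1) + 1 := by omega
    simp only [if_neg h1]
    rw [h2, List.replicate_succ']
    by_cases hd1 : d + 1 = 0
    · simp only [if_pos hd1.ge, hd1]
      have : (-d).toNat - 1 = 0 := by omega
      simp [this]
      exact Ne.symm hne
    · have h3 : ¬ 0 ≤ d + 1 := by omega
      simp only [if_neg h3]
      have h5 : (-(d+1)).toNat = (-d).toNat - 1 := by omega
      simp [Ne.symm hne]
      omega
  · subst h; simp
  · have h1 : 0 ≤ d := le_of_lt h
    have h2 : d.toNat = (d.toNat - 1) + 1 := by omega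
    simp only [if_pos h1]
    rw [h2, List.replicate_succ']
    have h3 : 0 ≤ d + 1 := by omega
    have h4 : (d + 1).toNat = (d.toNat - 1) + 1 + 1 := by omega
    simp [h3, h4, List.replicate_succ']

theorem pvRep_neg_flip (pos neg : String) (d : Int) :
    pvRep pos neg (-d) = pvRep neg pos d := by
  unfold pvRep
  rcases lt_trichotomy d 0 with h | h | h
  · have h0 : (0:Int) ≤ -d := by omega
    simp only [if_pos h0, if_neg (show ¬ (0:Int) ≤ d by omega)]
  · subst h; simp
  · have h1 : ¬ (0:Int) ≤ -d := by omega
    simp only [if_neg h1, if_pos (le_of_lt h), neg_neg]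

theorem pvStep_neg (pos neg : String) (hne : pos ≠ neg) (d : Int) :
    pvStep (pvRep pos neg d) neg = pvRep pos neg (d - 1) := by
  have := pvStep_pos neg pos (Ne.symm hne) (-d)
  rw [pvRep_neg_flip] at this
  rw [show (-d + 1) = -(d - 1) by ring, pvRep_neg_flip] at this
  exact this

-- the fold in B keeps both stacks in canonical form, indexed by the count differences
theorem fold_stacks (path : List String) (a b : Int) :
    path.foldl (fun (hv : List String × List String) p =>
      if p == "right" || p == "left" then (pvStep hv.1 p, hv.2)
      else if p == "up" || p == "down" then (hv.1, pvStep hv.2 p)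
      else hv) (pvRep "right" "left" a, pvRep "up" "down" b)
    = (pvRep "right" "left" (a + (path.count "right" : Int) - (path.count "left" : Int)),
       pvRep "up" "down" (b + (path.count "up" : Int) - (path.count "down" : Int))) := by
  induction path generalizing a b with
  | nil => simp
  | cons h t ih =>
    simp only [List.foldl_cons]
    by_cases h1 : h = "right" <;> by_cases h2 : h = "left" <;> by_cases h3 : h = "up" <;>
      by_cases h4 : h = "down" <;>
      simp_all [List.count_cons, pvStep_pos _ _ (by decide : "right" ≠ "left"),
        pvStep_neg _ _ (by decide : "right" ≠ "left"),
        pvStep_pos _ _ (by decide : "up" ≠ "down"),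
        pvStep_neg _ _ (by decide : "up" ≠ "down"), ih] <;> ring_nf

-- A's fold computes the count differences directly
theorem fold_counts (path : List String) (a b : Int) :
    path.foldl (fun (xy : Int × Int) p =>
      if p == "up" then (xy.1, xy.2 + 1)
      else if p == "down" then (xy.1, xy.2 - 1)
      else if p == "left" then (xy.1 - 1, xy.2)
      else if p == "right" then (xy.1 + 1, xy.2)
      else xy) (a, b)
    = (a + (path.count "right" : Int) - (path.count "left" : Int),
       b + (path.count "up" : Int) - (path.count "down" : Int)) := by
  induction path generalizing a b with
  | nil => simp
  | cons h t ih =>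
    simp only [List.foldl_cons]
    by_cases h1 : h = "up" <;> by_cases h2 : h = "down" <;> by_cases h3 : h = "left" <;>
      by_cases h4 : h = "right" <;>
      simp_all [List.count_cons, ih] <;> ring_nf

theorem rep_eq_rep (x : String) (n m : Nat) :
    List.replicate n x = List.replicate m x ↔ n = m := by
  constructor
  · intro h; have := congrArg List.length h; simpa using this
  · rintro rfl; rfl

theorem rep_left_ne (n : Nat) : List.replicate n "left" ≠ ["right", "right"] := by
  intro h
  have hl := congrArg List.length h
  simp at hl
  subst hl
  exact absurd h (by decide)

theorem pvRep_eq_two_iff (d : Int) :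
    pvRep "right" "left" d = ["right", "right"] ↔ d = 2 := by
  unfold pvRep
  split_ifs with h
  · rw [show (["right", "right"] : List String) = List.replicate 2 "right" from rfl, rep_eq_rep]
    omega
  · constructor
    · intro he; exact absurd he (rep_left_ne _)
    · intro hd; exact absurd hd (by omega)

theorem pvRep_eq_nil_iff (pos neg : String) (d : Int) :
    pvRep pos neg d = ([] : List String) ↔ d = 0 := by
  unfold pvRep
  split_ifs with h <;> simp [List.replicate_eq_nil_iff] <;> omega

-- ===== VERDICT (by name: the statement is the Claim_ definition above) =====
theorem is_goal_reached_spec : Claim_equal_is_goal_reached := by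
  intro path _
  unfold Spec_is_goal_reached is_goal_reached is_goal_reached_alt
  have hB := fold_stacks path 0 0
  rw [show pvRep "right" "left" 0 = ([] : List String) from rfl,
     show pvRep "up" "down" 0 = ([] : List String) from rfl] at hB
  rw [fold_counts, hB, Bool.eq_iff_iff]
  simp only [beq_iff_eq, Bool.and_eq_true, Prod.mk.injEq,
    pvRep_eq_two_iff, pvRep_eq_nil_iff]
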